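-- pv_equiv track=rewrite | github.com/JeyeSama/Ares-INFOIII-LimbajeFormale | LAB6/TP6.1.py | verifica_an_bn
-- ===== SOURCE A (Python) =====
-- def verifica_an_bn(cuvant):
--     """Verifica daca un cuvant respecta formatul a^n b^n."""
--     num_a = num_b = 0
--     found_b = False
--
--     for caracter in cuvant:
--         if caracter == 'a' and not found_b:
--             num_a += 1
--         elif caracter == 'b':
--             found_b = True
--             num_b += 1
--         else:
--             return False  # Caracter invalid
--
--     return num_a == num_b and num_a > 0  # n trebuie sa fie cel putin 1
-- ===== SOURCE B (Python) =====
-- def verifica_an_bn(cuvant):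
--     """Verifica daca un cuvant respecta formatul a^n b^n."""
--     n = 0
--     while n < len(cuvant) and cuvant[n] == 'a':
--         n += 1
--     return n > 0 and cuvant == 'a' * n + 'b' * n
-- ===== Notes on version B (the rewrite author's own statement) =====
-- stated objective: simpler
-- what changed: Replaces the found_b state machine with two counters by counting the length n of the leading run of a-characters and doing a single closed-form comparison of the whole word against the concatenation of n a-characters and n b-characters.
import Mathlib
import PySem

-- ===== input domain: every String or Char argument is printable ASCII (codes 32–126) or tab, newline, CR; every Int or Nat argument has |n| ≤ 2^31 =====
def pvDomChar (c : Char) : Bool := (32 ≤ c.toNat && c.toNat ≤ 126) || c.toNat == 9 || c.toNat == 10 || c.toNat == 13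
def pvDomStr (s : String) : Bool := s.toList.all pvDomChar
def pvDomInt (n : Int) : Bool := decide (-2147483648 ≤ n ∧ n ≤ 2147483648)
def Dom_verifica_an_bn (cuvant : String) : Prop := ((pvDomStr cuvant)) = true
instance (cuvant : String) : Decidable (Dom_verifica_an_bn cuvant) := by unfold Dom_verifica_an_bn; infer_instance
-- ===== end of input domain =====

-- B replaces A's found_b state machine (two counters) by a leading-'a' prefix count n and one
-- closed-form comparison of the word against 'a'*n + 'b'*n (objective: simpler).

-- ===== PORT A =====
-- the for-loop of A over the characters, carrying (num_a, num_b, found_b); the early `return False` yields false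
def pvLoopA : List Char → Int → Int → Bool → Bool
  | [], num_a, num_b, _ => num_a == num_b && decide (num_a > 0)
  | c :: rest, num_a, num_b, found_b =>
    if c == 'a' && !found_b then pvLoopA rest (num_a + 1) num_b found_b
    else if c == 'b' then pvLoopA rest num_a (num_b + 1) true
    else false

def verifica_an_bn (cuvant : String) : Bool := pvLoopA cuvant.toList 0 0 false

-- ===== PORT B =====
-- n = length of the leading run of 'a' (Source B's while-loop), then one comparison with 'a'*n + 'b'*n
def verifica_an_bn_alt (cuvant : String) : Bool :=
  let n := (cuvant.toList.takeWhile (· == 'a')).length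
  decide (n > 0) && (cuvant.toList == List.replicate n 'a' ++ List.replicate n 'b')

-- ===== PRECONDITION & SPEC =====
def Spec_verifica_an_bn (cuvant : String) (out : Bool) : Prop := out = verifica_an_bn_alt cuvant
instance (cuvant : String) (out : Bool) : Decidable (Spec_verifica_an_bn cuvant out) := by unfold Spec_verifica_an_bn; infer_instance

-- ===== CLAIM (what is proved, stated in full; the proofs are below) =====
def Claim_equal_verifica_an_bn : Prop := ∀ (cuvant : String), Dom_verifica_an_bn cuvant → Spec_verifica_an_bn cuvant (verifica_an_bn cuvant)

-- ===== LEMMAS AND PROOFS =====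

-- once found_b is set, A's loop accepts exactly a run of 'b's balancing the counts
lemma pvLoopA_true (cs : List Char) (num_a num_b : Int) :
    pvLoopA cs num_a num_b true
      = (cs.all (· == 'b') && (num_a == num_b + (cs.length : Int)) && decide (0 < num_a)) := by
  induction cs generalizing num_b with
  | nil => simp [pvLoopA]
  | cons c rest ih =>
    simp only [pvLoopA, Bool.not_true, Bool.and_false, Bool.false_eq_true, if_false]
    by_cases hc : c = 'b'
    · subst hc
      rw [if_pos (by simp), ih]
      simp only [List.all_cons, List.length_cons, beq_self_eq_true, Bool.true_and]
      rw [show num_b + 1 + (rest.length : Int) = num_b + ((rest.length : Int) + 1) from by ring]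
      push_cast
      ring_nf
    · rw [if_neg (by simp [hc])]
      simp [hc]

-- in the searching phase (found_b = false, num_b = 0): the result is determined by the
-- leading-'a' run and the remainder of the word
lemma pvLoopA_false (cs : List Char) (num_a : Nat) :
    pvLoopA cs (num_a : Int) 0 false
      = (decide (0 < num_a + (cs.takeWhile (· == 'a')).length) &&
         (cs.dropWhile (· == 'a') == List.replicate (num_a + (cs.takeWhile (· == 'a')).length) 'b')) := by
  induction cs generalizing num_a with
  | nil =>
    rw [Bool.eq_iff_iff]
    simp [pvLoopA]
    omega
  | cons c rest ih =>
    by_cases hc : c = 'a'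
    · subst hc
      have hcast : ((num_a : Int) + 1) = ((num_a + 1 : Nat) : Int) := by push_cast; ring
      simp only [pvLoopA, List.takeWhile_cons, List.dropWhile_cons, beq_self_eq_true,
        Bool.not_false, Bool.and_true, if_true, List.length_cons]
      rw [hcast, ih]
      have h2 : num_a + ((List.takeWhile (fun x => x == 'a') rest).length + 1)
           = num_a + 1 + (List.takeWhile (fun x => x == 'a') rest).length := by omega
      simp [h2]
    · by_cases hb : c = 'b'
      · subst hb
        simp only [pvLoopA]
        rw [if_neg (by decide), if_pos (by decide), pvLoopA_true,
          List.takeWhile_cons_of_neg (by decide), List.dropWhile_cons_of_neg (by decide)]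
        rw [Bool.eq_iff_iff]
        simp [List.eq_replicate_iff, List.all_eq_true]
        constructor
        · intro h
          exact ⟨by omega, by omega, h.1.1⟩
        · intro h
          exact ⟨⟨h.2.2, by omega⟩, by omega⟩
      · simp only [pvLoopA]
        rw [if_neg (by simp [hc]), if_neg (by simp [hb]),
          List.takeWhile_cons_of_neg (by simp [hc]), List.dropWhile_cons_of_neg (by simp [hc])]
        rw [Bool.eq_iff_iff]
        simp [List.eq_replicate_iff]
        exact fun _ _ h3 => absurd h3 hb

-- the leading-'a' run is literally a block of 'a's
lemma takeWhile_a_replicate (cs : List Char) :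
    cs.takeWhile (· == 'a') = List.replicate (cs.takeWhile (· == 'a')).length 'a' := by
  rw [List.eq_replicate_iff]
  exact ⟨rfl, fun b hb => by simpa using List.mem_takeWhile_imp hb⟩

-- ===== VERDICT (by name: the statement is the Claim_ definition above) =====
theorem verifica_an_bn_spec : Claim_equal_verifica_an_bn := by
  intro s _
  unfold Spec_verifica_an_bn verifica_an_bn verifica_an_bn_alt
  have h0 : pvLoopA s.toList 0 0 false = pvLoopA s.toList ((0 : Nat) : Int) 0 false := rfl
  rw [h0, pvLoopA_false]
  simp only [Nat.zero_add]
  rw [Bool.eq_iff_iff]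
  simp only [Bool.and_eq_true, decide_eq_true_eq, beq_iff_eq]
  constructor
  · rintro ⟨hpos, hdw⟩
    refine ⟨hpos, ?_⟩
    conv_lhs => rw [← List.takeWhile_append_dropWhile (p := (· == 'a')) (l := s.toList)]
    rw [hdw, takeWhile_a_replicate]
    simp
  · rintro ⟨hpos, heq⟩
    refine ⟨hpos, ?_⟩
    have := heq
    conv_lhs at this => rw [← List.takeWhile_append_dropWhile (p := (· == 'a')) (l := s.toList)]
    rw [takeWhile_a_replicate s.toList] at this
    simp only [List.length_replicate] at this
    exact List.append_cancel_left this
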